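-- pv_equiv track=rewrite | github.com/KaylenRamish/example-repo | minesweeper.py | count_adjacent_mines
-- ===== SOURCE A (Python) =====
-- def is_valid_position(grid, row, col):
--     # Check if the position is within bounds of the grid
--     return 0 <= row < len(grid) and 0 <= col < len(grid[0])
--
-- def count_adjacent_mines(grid, row, col):
--     # Define the possible adjacent positions
--     directions = [(-1, -1), (-1, 0), (-1, 1),
--                   (0, -1),           (0, 1),
--                   (1, -1), (1, 0), (1, 1)]
--
--     count = 0
--     for dr, dc in directions:
--         new_row, new_col = row + dr, col + dc
--         if is_valid_position(grid, new_row, new_col) and grid[new_row][new_col] == '#':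
--             count += 1
--
--     return count
-- ===== SOURCE B (Python) =====
-- def count_adjacent_mines(grid, row, col):
--     # Index the board once: the set of mine coordinates; then membership-test
--     # the eight neighbor coordinates of (row, col) against it.
--     mines = {(r, c) for r, line in enumerate(grid)
--                     for c, cell in enumerate(line) if cell == '#'}
--     height = len(grid)
--     width = len(grid[0]) if grid else 0
--     return sum(1 for r in range(row - 1, row + 2)
--                  for c in range(col - 1, col + 2)
--                  if (r, c) != (row, col)
--                  and 0 <= r < height and 0 <= c < width
--                  and (r, c) in mines)
-- ===== Notes on version B (the rewrite author's own statement) =====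
-- stated objective: alternative
-- what changed: Instead of probing the grid at 8 fixed offsets behind a bounds guard, B first builds a set of all mine coordinates by enumerating the grid and then counts which of the 8 neighbor coordinates (within the len(grid) x len(grid[0]) board) are members of that set.
import Mathlib
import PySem

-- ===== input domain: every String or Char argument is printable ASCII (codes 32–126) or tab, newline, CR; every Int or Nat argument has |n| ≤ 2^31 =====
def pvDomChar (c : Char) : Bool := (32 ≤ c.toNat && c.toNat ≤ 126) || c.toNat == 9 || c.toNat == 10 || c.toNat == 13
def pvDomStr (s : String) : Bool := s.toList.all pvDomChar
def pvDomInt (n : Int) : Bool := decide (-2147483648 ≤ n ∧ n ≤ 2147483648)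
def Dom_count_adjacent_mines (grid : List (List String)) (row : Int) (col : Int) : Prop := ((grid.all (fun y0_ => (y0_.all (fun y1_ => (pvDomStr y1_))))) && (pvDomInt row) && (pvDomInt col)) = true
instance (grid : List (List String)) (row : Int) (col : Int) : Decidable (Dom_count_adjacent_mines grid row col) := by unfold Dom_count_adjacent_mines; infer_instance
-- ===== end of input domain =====

-- B replaces A's 8-fixed-offset probing of the grid by building a set of all mine coordinates
-- once and membership-testing the neighbor coordinates against it; objective: alternative.

-- ===== PORT A =====
-- grid[0] is reached in Python only when the first conjunct holds (grid nonempty),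
-- so the `.getD []` default is never the decisive value.
def is_valid_position (grid : List (List String)) (row : Int) (col : Int) : Bool :=
  (decide (0 ≤ row) && decide (row < (grid.length : Int))) &&
  (decide (0 ≤ col) && decide (col < (((PySem.List.pyGet? grid 0).getD []).length : Int)))

-- grid[new_row][new_col] is evaluated only after is_valid_position, and Pre_ additionally
-- guarantees the indexed row is long enough, so the `.getD` defaults are exact on Pre_.
def count_adjacent_mines (grid : List (List String)) (row : Int) (col : Int) : Int :=
  let directions : List (Int × Int) :=
    [(-1, -1), (-1, 0), (-1, 1), (0, -1), (0, 1), (1, -1), (1, 0), (1, 1)]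
  directions.foldl
    (fun count d =>
      let new_row := row + d.1
      let new_col := col + d.2
      if is_valid_position grid new_row new_col &&
          ((PySem.List.pyGet? ((PySem.List.pyGet? grid new_row).getD []) new_col).getD "" == "#")
      then count + 1 else count)
    0

-- ===== PORT B =====
-- the set comprehension {(r, c) for r, line in enumerate(grid) for c, cell in enumerate(line) if cell == '#'}
def pvMinesSet (grid : List (List String)) : PySem.Set (Int × Int) :=
  PySem.Set.ofList
    ((PySem.List.enumerate grid).flatMap (fun p =>
      (PySem.List.enumerate p.2).filterMap (fun q =>
        if q.2 == "#" then some (p.1, q.1) else none)))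

def count_adjacent_mines_alt (grid : List (List String)) (row : Int) (col : Int) : Int :=
  let mines := pvMinesSet grid
  let height : Int := grid.length
  let width : Int := match grid with | [] => 0 | line0 :: _ => (line0.length : Int)
  (PySem.List.pyRange (row - 1) (row + 2) 1).foldl
    (fun total r =>
      (PySem.List.pyRange (col - 1) (col + 2) 1).foldl
        (fun total c =>
          if (!(r == row && c == col)) &&
              (decide (0 ≤ r) && decide (r < height)) &&
              (decide (0 ≤ c) && decide (c < width)) &&
              PySem.Set.contains mines (r, c)
          then total + 1 else total)
        total)
    0

-- ===== PRECONDITION & SPEC =====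
-- Pre_ excludes exactly the ragged grids on which the Python A raises IndexError: a non-center
-- window cell whose column is in range of grid[0] but not of its own (shorter) row.
def Pre_count_adjacent_mines (grid : List (List String)) (row : Int) (col : Int) : Prop :=
  ([row - 1, row, row + 1].all fun r =>
    [col - 1, col, col + 1].all fun c =>
      (r == row && c == col) || !decide (0 <= r) || !decide (r < (grid.length : Int)) ||
      !decide (0 <= c) || !decide (c < (((PySem.List.pyGet? grid 0).getD []).length : Int)) ||
      decide (c < (((PySem.List.pyGet? grid r).getD []).length : Int))) = true
instance (grid : List (List String)) (row : Int) (col : Int) : Decidable (Pre_count_adjacent_mines grid row col) := by unfold Pre_count_adjacent_mines; infer_instance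

def pvWitness_count_adjacent_mines : List (List String) × Int × Int :=
  ([["#", ".", "."], [".", ".", "#"], [".", "#", "."]], 1, 1)

def Spec_count_adjacent_mines (grid : List (List String)) (row : Int) (col : Int) (out : Int) : Prop := out = count_adjacent_mines_alt grid row col
instance (grid : List (List String)) (row : Int) (col : Int) (out : Int) : Decidable (Spec_count_adjacent_mines grid row col out) := by unfold Spec_count_adjacent_mines; infer_instance

-- ===== CLAIM (what is proved, stated in full; the proofs are below) =====
def Claim_equal_count_adjacent_mines : Prop := ∀ (grid : List (List String)) (row : Int) (col : Int), Dom_count_adjacent_mines grid row col → Pre_count_adjacent_mines grid row col → Spec_count_adjacent_mines grid row col (count_adjacent_mines grid row col)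

-- ===== LEMMAS AND PROOFS =====

-- whether window cell (r, c) is in bounds (by A's bound len(grid[0])) and holds a mine
def pvMine (grid : List (List String)) (r c : Int) : Bool :=
  is_valid_position grid r c &&
  ((PySem.List.pyGet? ((PySem.List.pyGet? grid r).getD []) c).getD "" == "#")

def pvCell (grid : List (List String)) (r c : Int) : Int := if pvMine grid r c then 1 else 0

-- canonical value: the 8 neighbours of (row, col)
def pvW (grid : List (List String)) (row col : Int) : Int :=
  pvCell grid (row - 1) (col - 1) + pvCell grid (row - 1) col + pvCell grid (row - 1) (col + 1) +
  pvCell grid row (col - 1) + pvCell grid row (col + 1) +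
  pvCell grid (row + 1) (col - 1) + pvCell grid (row + 1) col + pvCell grid (row + 1) (col + 1)

lemma ite_succ_eq_add (a : Int) (b : Bool) : (if b then a + 1 else a) = a + (if b then 1 else 0) := by
  cases b <;> simp

lemma A_eq_W (grid : List (List String)) (row col : Int) :
    count_adjacent_mines grid row col = pvW grid row col := by
  simp only [count_adjacent_mines, List.foldl_cons, List.foldl_nil, ite_succ_eq_add]
  simp only [show row + (-1 : Int) = row - 1 from by ring, show col + (-1 : Int) = col - 1 from by ring,
    add_zero]
  simp only [pvW, pvCell, pvMine]
  simp only [add_assoc, zero_add]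
  rfl

lemma range3 (x : Int) : PySem.List.pyRange (x - 1) (x + 2) 1 = [x - 1, x, x + 1] := by
  rw [PySem.List.pyRange_one_cons (by omega), show x - 1 + 1 = x by ring,
      PySem.List.pyRange_one_cons (by omega),
      PySem.List.pyRange_one_cons (by omega), show x + 1 + 1 = x + 2 by ring,
      PySem.List.pyRange_one_eq_nil (by omega)]

lemma width_eq (grid : List (List String)) :
    (match grid with | [] => (0 : Int) | line0 :: _ => (line0.length : Int))
      = (((PySem.List.pyGet? grid 0).getD []).length : Int) := by
  cases grid
  · simp [PySem.List.pyGet?, PySem.List.pyIdx?]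
  · simp only [PySem.List.pyGet?_zero_cons, Option.getD_some]

lemma mem_minesSet (grid : List (List String)) (r c : Int)
    (hr0 : 0 <= r) (hr : r < (grid.length : Int))
    (hc0 : 0 <= c) (hc : c < (((PySem.List.pyGet? grid r).getD []).length : Int)) :
    PySem.Set.contains (pvMinesSet grid) (r, c)
      = ((PySem.List.pyGet? ((PySem.List.pyGet? grid r).getD []) c).getD "" == "#") := by
  have hrn : r.toNat < grid.length := by omega
  have hgr : PySem.List.pyGet? grid r = some (grid[r.toNat]'hrn) := by
    exact PySem.List.pyGet?_eq_some_getElem _ hr0 hr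
  rw [hgr] at hc ⊢
  simp only [Option.getD_some] at hc ⊢
  have hcn : c.toNat < (grid[r.toNat]'hrn).length := by omega
  have hgc : PySem.List.pyGet? (grid[r.toNat]'hrn) c = some ((grid[r.toNat]'hrn)[c.toNat]'hcn) := by
    exact PySem.List.pyGet?_eq_some_getElem _ hc0 hc
  rw [hgc]
  simp only [Option.getD_some]
  have hcont : PySem.Set.contains (pvMinesSet grid) (r, c) = true ↔ (r, c) ∈ pvMinesSet grid := by
    simp [PySem.Set.contains]
  have hmem : (r, c) ∈ pvMinesSet grid ↔ (grid[r.toNat]'hrn)[c.toNat]'hcn = "#" := by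
    unfold pvMinesSet
    rw [PySem.Set.mem_ofList]
    simp only [List.mem_flatMap, List.mem_filterMap, PySem.List.mem_enumerate_iff]
    constructor
    · rintro ⟨p, ⟨k, hk, rfl⟩, q, ⟨j, hj, rfl⟩, hsome⟩
      split at hsome
      case isTrue hb =>
        simp only [Option.some.injEq, Prod.mk.injEq] at hsome
        have hk2 : k = r.toNat := by omega
        have hj2 : j = c.toNat := by omega
        subst hk2; subst hj2
        exact beq_iff_eq.mp hb
      case isFalse => exact absurd hsome (by simp)
    · intro h
      refine ⟨((r.toNat : Int), grid[r.toNat]'hrn), ⟨r.toNat, hrn, by simp⟩,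
              ((c.toNat : Int), (grid[r.toNat]'hrn)[c.toNat]'hcn), ⟨c.toNat, hcn, by simp⟩, ?_⟩
      simp [h, Int.toNat_of_nonneg hr0, Int.toNat_of_nonneg hc0]
  cases hb : ((grid[r.toNat]'hrn)[c.toNat]'hcn == "#")
  · exact Bool.eq_false_iff.mpr (fun ht =>
      (beq_eq_false_iff_ne.mp hb) (hmem.mp (hcont.mp ht)))
  · exact hcont.mpr (hmem.mpr (beq_iff_eq.mp hb))

lemma pre_spec (grid : List (List String)) (row col : Int)
    (h : Pre_count_adjacent_mines grid row col) :
    ∀ r ∈ [row - 1, row, row + 1], ∀ c ∈ [col - 1, col, col + 1],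
      ¬(r = row ∧ c = col) →
      0 <= r → r < (grid.length : Int) →
      0 <= c → c < (((PySem.List.pyGet? grid 0).getD []).length : Int) →
      c < (((PySem.List.pyGet? grid r).getD []).length : Int) := by
  intro r hrm c hcm hne h0r h1r h0c h1c
  unfold Pre_count_adjacent_mines at h
  rw [List.all_eq_true] at h
  have h3 := h r hrm
  rw [List.all_eq_true] at h3
  have h4 := h3 c hcm
  simp only [Bool.or_eq_true, Bool.and_eq_true, beq_iff_eq, Bool.not_eq_true',
    decide_eq_true_eq, decide_eq_false_iff_not] at h4
  tauto

lemma cell_eq (grid : List (List String)) (row col r c : Int)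
    (hp : ∀ r ∈ [row - 1, row, row + 1], ∀ c ∈ [col - 1, col, col + 1],
      ¬(r = row ∧ c = col) →
      0 <= r → r < (grid.length : Int) →
      0 <= c → c < (((PySem.List.pyGet? grid 0).getD []).length : Int) →
      c < (((PySem.List.pyGet? grid r).getD []).length : Int))
    (hrm : r ∈ [row - 1, row, row + 1]) (hcm : c ∈ [col - 1, col, col + 1])
    (hne : ¬(r = row ∧ c = col)) :
    (if (!(r == row && c == col)) &&
        (decide (0 <= r) && decide (r < (grid.length : Int))) &&
        (decide (0 <= c) && decide (c < (((PySem.List.pyGet? grid 0).getD []).length : Int))) &&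
        PySem.Set.contains (pvMinesSet grid) (r, c)
     then (1 : Int) else 0) = pvCell grid r c := by
  have hb : (r == row && c == col) = false := by
    simp only [Bool.and_eq_false_iff, beq_eq_false_iff_ne]
    tauto
  by_cases h0r : 0 <= r
  · by_cases h1r : r < (grid.length : Int)
    · by_cases h0c : 0 <= c
      · by_cases h1c : c < (((PySem.List.pyGet? grid 0).getD []).length : Int)
        · have hlen := hp r hrm c hcm hne h0r h1r h0c h1c
          rw [mem_minesSet grid r c h0r h1r h0c hlen]
          simp [pvCell, pvMine, is_valid_position, hb, h0r, h1r, h0c, h1c]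
        · simp [pvCell, pvMine, is_valid_position, h1c]
      · simp [pvCell, pvMine, is_valid_position, h0c]
    · simp [pvCell, pvMine, is_valid_position, h1r]
  · simp [pvCell, pvMine, is_valid_position, h0r]

lemma B_eq_W (grid : List (List String)) (row col : Int)
    (hpre : Pre_count_adjacent_mines grid row col) :
    count_adjacent_mines_alt grid row col = pvW grid row col := by
  have hp := pre_spec grid row col hpre
  simp only [count_adjacent_mines_alt]
  rw [width_eq grid, range3 row, range3 col]
  simp only [List.foldl_cons, List.foldl_nil, ite_succ_eq_add]
  rw [cell_eq grid row col (row - 1) (col - 1) hp (by simp) (by simp) (by omega),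
      cell_eq grid row col (row - 1) col hp (by simp) (by simp) (by omega),
      cell_eq grid row col (row - 1) (col + 1) hp (by simp) (by simp) (by omega),
      cell_eq grid row col row (col - 1) hp (by simp) (by simp) (by omega),
      cell_eq grid row col row (col + 1) hp (by simp) (by simp) (by omega),
      cell_eq grid row col (row + 1) (col - 1) hp (by simp) (by simp) (by omega),
      cell_eq grid row col (row + 1) col hp (by simp) (by simp) (by omega),
      cell_eq grid row col (row + 1) (col + 1) hp (by simp) (by simp) (by omega)]
  simp only [beq_self_eq_true, Bool.and_self, Bool.not_true, Bool.false_and, Bool.false_eq_true,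
    if_false, add_zero, zero_add]
  simp only [pvW]

-- ===== VERDICT (by name: the statement is the Claim_ definition above) =====
theorem count_adjacent_mines_spec : Claim_equal_count_adjacent_mines := by
  intro grid row col _ hpre
  unfold Spec_count_adjacent_mines
  rw [A_eq_W, B_eq_W grid row col hpre]
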